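-- pv_equiv track=rewrite | github.com/sean-mochocki/PhD_Work | xcsp3_creator_2.py | return_kn_covered_by_lo
-- ===== SOURCE A (Python) =====
-- def return_kn_covered_by_lo(num_kn, knowledge_nodes_covered):
--     # Loop through each knowledge node and identify which LOs cover it
--     kn_covered_by_lo = []
--     for n in range(num_kn):
--         # Initialize an empty list to store the indices of the learning objects that cover the current knowledge node
--         lo_indices = []
--         # Loop through each learning object
--         for i in range(len(knowledge_nodes_covered)):
--             # Check if the current learning object covers the current knowledge node
--             if knowledge_nodes_covered[i] == n:
--                 # If yes, append the index of the current learning object to the lo_indices list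
--                 lo_indices.append(i)
--         # After the inner loop, append the lo_indices list to the kn_covered_by_lo list
--         kn_covered_by_lo.append(lo_indices)
--     return kn_covered_by_lo
-- ===== SOURCE B (Python) =====
-- def return_kn_covered_by_lo(num_kn, knowledge_nodes_covered):
--     # Single bucket pass: one list per knowledge node, fill in one sweep over the LOs.
--     kn_covered_by_lo = [[] for _ in range(num_kn)]
--     for i, v in enumerate(knowledge_nodes_covered):
--         if 0 <= v < num_kn:
--             kn_covered_by_lo[v].append(i)
--     return kn_covered_by_lo
-- ===== Notes on version B (the rewrite author's own statement) =====
-- stated objective: faster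
-- what changed: Replaces the per-node inner scan over all LOs with a single bucket pass that appends each LO index to the bucket of the node it covers.
import Mathlib
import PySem

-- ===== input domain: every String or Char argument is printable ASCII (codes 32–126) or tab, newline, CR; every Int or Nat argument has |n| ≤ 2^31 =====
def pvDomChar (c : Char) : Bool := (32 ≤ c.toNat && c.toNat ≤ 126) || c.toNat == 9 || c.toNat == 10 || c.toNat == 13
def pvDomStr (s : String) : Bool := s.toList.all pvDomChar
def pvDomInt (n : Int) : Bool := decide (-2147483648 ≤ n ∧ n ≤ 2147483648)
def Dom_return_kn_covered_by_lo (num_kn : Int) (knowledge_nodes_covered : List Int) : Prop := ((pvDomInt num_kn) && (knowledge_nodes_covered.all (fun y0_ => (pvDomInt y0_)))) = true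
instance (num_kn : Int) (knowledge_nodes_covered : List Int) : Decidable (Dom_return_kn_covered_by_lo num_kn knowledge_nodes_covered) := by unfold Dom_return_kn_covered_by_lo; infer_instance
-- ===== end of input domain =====

-- B replaces A's per-node inner scan over all LOs with one bucket pass over the LOs (asymptotically faster; same return value).
-- ===== PORT A =====
-- literal port of A: outer loop over range(num_kn), inner loop over range(len(knowledge_nodes_covered))
def return_kn_covered_by_lo (num_kn : Int) (knowledge_nodes_covered : List Int) : List (List Int) :=
  (PySem.List.pyRange 0 num_kn 1).foldl (fun kn_covered_by_lo n =>
    let lo_indices :=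
      (PySem.List.pyRange 0 (PySem.List.len knowledge_nodes_covered) 1).foldl
        (fun lo_indices i =>
          if PySem.List.pyGetD knowledge_nodes_covered i 0 = n then lo_indices ++ [i]
          else lo_indices) []
    kn_covered_by_lo ++ [lo_indices]) []

-- ===== PORT B =====
-- literal port of B: the for-loop over enumerate(knowledge_nodes_covered), mutating the bucket list
def bucketPass (num_kn : Int) : List (Int × Int) → List (List Int) → List (List Int)
  | [], bs => bs
  | (i, v) :: rest, bs =>
    if 0 ≤ v ∧ v < num_kn then
      bucketPass num_kn rest (bs.set v.toNat (bs.getD v.toNat [] ++ [i]))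
    else
      bucketPass num_kn rest bs

def return_kn_covered_by_lo_alt (num_kn : Int) (knowledge_nodes_covered : List Int) : List (List Int) :=
  bucketPass num_kn (PySem.List.enumerate knowledge_nodes_covered 0)
    (List.replicate num_kn.toNat [])

-- ===== PRECONDITION & SPEC =====
def Spec_return_kn_covered_by_lo (num_kn : Int) (knowledge_nodes_covered : List Int) (out : List (List Int)) : Prop := out = return_kn_covered_by_lo_alt num_kn knowledge_nodes_covered
instance (num_kn : Int) (knowledge_nodes_covered : List Int) (out : List (List Int)) : Decidable (Spec_return_kn_covered_by_lo num_kn knowledge_nodes_covered out) := by unfold Spec_return_kn_covered_by_lo; infer_instance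

-- ===== CLAIM (what is proved, stated in full; the proofs are below) =====
def Claim_equal_return_kn_covered_by_lo : Prop := ∀ (num_kn : Int) (knowledge_nodes_covered : List Int), Dom_return_kn_covered_by_lo num_kn knowledge_nodes_covered → Spec_return_kn_covered_by_lo num_kn knowledge_nodes_covered (return_kn_covered_by_lo num_kn knowledge_nodes_covered)

-- ===== LEMMAS AND PROOFS =====

-- ===== VERDICT (by name: the statement is the Claim_ definition above) =====
-- indices (starting at offset k) of the elements of l equal to n
def idx : List Int → Int → Int → List Int
  | [], _, _ => []
  | v :: t, n, k => if v = n then k :: idx t n (k + 1) else idx t n (k + 1)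

theorem idx_eq_filter_enumerate (l : List Int) (n k : Int) :
    idx l n k = ((PySem.List.enumerate l k).filter (fun p => decide (p.2 = n))).map (·.1) := by
  induction l generalizing k with
  | nil => simp [idx, PySem.List.enumerate_nil]
  | cons v t ih =>
    simp only [idx, PySem.List.enumerate_cons, List.filter_cons]
    by_cases h : v = n <;> simp [h, ih]

theorem length_bucketPass (num_kn : Int) (e : List (Int × Int)) (bs : List (List Int)) :
    (bucketPass num_kn e bs).length = bs.length := by
  induction e generalizing bs with
  | nil => rfl
  | cons p rest ih =>
    obtain ⟨i, v⟩ := p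
    simp only [bucketPass]
    split_ifs with h
    · rw [ih]; simp
    · exact ih bs

theorem bucketPass_getElem? (num_kn : Int) (l : List Int) (k : Int) (bs : List (List Int))
    (hlen : bs.length = num_kn.toNat) (m : Nat) (hm : m < bs.length) :
    (bucketPass num_kn (PySem.List.enumerate l k) bs)[m]? = some (bs[m] ++ idx l (m : Int) k) := by
  induction l generalizing k bs with
  | nil =>
    rw [PySem.List.enumerate_nil]
    simp [bucketPass, idx, List.getElem?_eq_getElem hm]
  | cons v t ih =>
    rw [PySem.List.enumerate_cons]
    simp only [bucketPass]
    split_ifs with h1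
    · have hset : m < (bs.set v.toNat (bs.getD v.toNat [] ++ [k])).length := by simpa using hm
      rw [ih (k + 1) _ (by simpa using hlen) hset]
      by_cases hv : v = (m : Int)
      · have hvm : v.toNat = m := by omega
        subst hvm
        rw [List.getElem_set_self (by simpa using hm), List.getD_eq_getElem _ _ hm]
        simp only [idx, if_pos hv, List.append_assoc, List.singleton_append]
      · have hvm : v.toNat ≠ m := by omega
        rw [List.getElem_set_ne hvm]
        simp only [idx, if_neg hv]
    · -- v outside [0, num_kn) : skipped, and v ≠ m since m < num_kn.toNat
      have hv : v ≠ (m : Int) := by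
        intro h; subst h
        have : m < num_kn.toNat := hlen ▸ hm
        omega
      rw [ih (k + 1) bs hlen hm]
      simp [idx, hv]

theorem innerA_eq_idx (kns : List Int) (n : Int) :
    (PySem.List.pyRange 0 (kns.length : Int) 1).foldl
      (fun li i => if PySem.List.pyGetD kns i 0 = n then li ++ [i] else li) [] = idx kns n 0 := by
  rw [PySem.List.foldl_append_ite_eq_filter, idx_eq_filter_enumerate,
    PySem.List.enumerate_eq_map_pyRange kns 0, List.filter_map, List.map_map]
  simp [Function.comp_def]

theorem return_kn_covered_by_lo_spec : Claim_equal_return_kn_covered_by_lo := by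
  intro num_kn kns _
  unfold Spec_return_kn_covered_by_lo return_kn_covered_by_lo return_kn_covered_by_lo_alt
  rw [PySem.List.foldl_append_singleton_eq_map, List.nil_append]
  apply List.ext_getElem?
  intro m
  by_cases hm : m < num_kn.toNat
  · rw [List.getElem?_map,
      bucketPass_getElem? num_kn kns 0 _ (by simp) m (by simpa using hm),
      PySem.List.getElem?_pyRange_one, if_pos (by simpa using hm)]
    simp only [Option.map_some, zero_add, List.getElem_replicate, List.nil_append,
      PySem.List.len_eq]
    exact congrArg some (innerA_eq_idx kns m)
  · rw [List.getElem?_eq_none, List.getElem?_eq_none]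
    · rw [length_bucketPass]; simpa using hm
    · simpa [PySem.List.length_pyRange_one] using hm
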